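-- pv_equiv track=rewrite | github.com/anjaekk/algorithm | BOJ/최적화/1407.py | square_of_two
-- ===== SOURCE A (Python) =====
-- def square_of_two(num):
--     square = 2
--     count = num
--     while True:
--         if square > num:
--             break
--         count += (num // square) * square//2
--         square *= 2
--     return count
-- ===== SOURCE B (Python) =====
-- def square_of_two(num):
--     # halving recursion: count = num + g(num//2), where g(m) = m + 2*g(m//2)
--     if num < 2:
--         return num
--     def g(m):
--         return 0 if m < 1 else m + 2 * g(m // 2)
--     return num + g(num // 2)
-- ===== Notes on version B (the rewrite author's own statement) =====
-- stated objective: alternative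
-- what changed: Replaces the doubling-square accumulator loop with a single halving recursion g(m) = m + 2*g(m//2) applied once to num//2, using the identity sum_{2^i<=num} (num//2^i)*2^(i-1) = g(num//2).
import Mathlib
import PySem

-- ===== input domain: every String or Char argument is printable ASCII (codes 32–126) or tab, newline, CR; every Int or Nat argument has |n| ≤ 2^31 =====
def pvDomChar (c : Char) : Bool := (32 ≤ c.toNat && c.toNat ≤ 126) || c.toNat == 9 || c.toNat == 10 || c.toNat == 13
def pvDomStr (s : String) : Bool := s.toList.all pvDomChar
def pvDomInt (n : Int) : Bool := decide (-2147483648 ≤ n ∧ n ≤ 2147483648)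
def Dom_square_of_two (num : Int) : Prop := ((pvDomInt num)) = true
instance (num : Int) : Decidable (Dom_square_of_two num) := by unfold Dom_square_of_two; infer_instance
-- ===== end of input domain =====

-- B replaces A's doubling-square accumulator loop with a single halving recursion
-- g(m) = m + 2*g(m//2) applied once to num//2; same values, no speed claim.

-- ===== PORT A =====
-- while-True loop of A; fuel 40 suffices for every |num| ≤ 2^31 (proved below)
def squareOfTwoLoop : Nat → Int → Int → Int → Int
  | 0, _, _, count => count
  | fuel+1, num, square, count =>
    if square > num then count
    else squareOfTwoLoop fuel num (square * 2)
      (count + PySem.Int.floordiv (PySem.Int.floordiv num square * square) 2)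

def square_of_two (num : Int) : Int := squareOfTwoLoop 40 num 2 num

-- ===== PORT B =====
def altG (m : Int) : Int :=
  if m < 1 then 0 else m + 2 * altG (PySem.Int.floordiv m 2)
termination_by m.toNat
decreasing_by
  rw [PySem.Int.floordiv_eq_ediv_of_pos (by omega : (0:Int) < 2)]
  omega

def square_of_two_alt (num : Int) : Int :=
  if num < 2 then num else num + altG (PySem.Int.floordiv num 2)

-- ===== PRECONDITION & SPEC =====
def Spec_square_of_two (num : Int) (out : Int) : Prop := out = square_of_two_alt num
instance (num : Int) (out : Int) : Decidable (Spec_square_of_two num out) := by unfold Spec_square_of_two; infer_instance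

-- ===== CLAIM (what is proved, stated in full; the proofs are below) =====
def Claim_equal_square_of_two : Prop := ∀ (num : Int), Dom_square_of_two num → Spec_square_of_two num (square_of_two num)

-- ===== LEMMAS AND PROOFS =====

lemma altG_nonpos {m : Int} (h : m < 1) : altG m = 0 := by
  rw [altG]; simp [h]

lemma altG_pos {m : Int} (h : 1 ≤ m) : altG m = m + 2 * altG (m / 2) := by
  rw [altG, PySem.Int.floordiv_eq_ediv_of_pos (by omega : (0:Int) < 2)]
  simp [show ¬ m < 1 by omega]

lemma loop_eq (f : Nat) : ∀ (num s count : Int), 1 ≤ s → 0 ≤ num → num < 2 * s * 2 ^ f →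
    squareOfTwoLoop f num (2 * s) count = count + s * altG (num / (2 * s)) := by
  induction f with
  | zero =>
    intro num s count hs hn hlt
    simp only [pow_zero, mul_one] at hlt
    rw [squareOfTwoLoop, Int.ediv_eq_zero_of_lt hn hlt, altG_nonpos (by omega)]
    ring
  | succ f ih =>
    intro num s count hs hn hlt
    rw [squareOfTwoLoop]
    by_cases hgt : 2 * s > num
    · rw [if_pos hgt, Int.ediv_eq_zero_of_lt hn (by omega), altG_nonpos (by omega)]
      ring
    · rw [if_neg hgt]
      have hle : 2 * s ≤ num := by omega
      have h2s : (0:Int) < 2 * s := by omega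
      set q := num / (2 * s) with hq
      have hq1 : 1 ≤ q := by
        rw [hq, Int.le_ediv_iff_mul_le h2s]; omega
      have hfd : PySem.Int.floordiv num (2 * s) = q :=
        PySem.Int.floordiv_eq_ediv_of_pos h2s
      have hX : PySem.Int.floordiv (q * (2 * s)) 2 = q * s := by
        rw [PySem.Int.floordiv_eq_ediv_of_pos (by omega : (0:Int) < 2),
          show q * (2 * s) = q * s * 2 by ring, Int.mul_ediv_cancel _ (by omega)]
      have hrec : (2 * s) * 2 = 2 * (2 * s) := by ring
      rw [hfd, hX, hrec, ih num (2 * s) _ (by omega) hn (by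
        calc num < 2 * s * 2 ^ (f + 1) := hlt
        _ = 2 * (2 * s) * 2 ^ f := by ring)]
      have hdiv : num / (2 * (2 * s)) = q / 2 := by
        rw [show 2 * (2 * s) = 2 * s * 2 by ring, ← Int.ediv_ediv_of_nonneg (by omega)]
      rw [hdiv, altG_pos hq1]
      ring

theorem square_of_two_spec : Claim_equal_square_of_two := by
  intro num hdom
  unfold Spec_square_of_two square_of_two square_of_two_alt
  have hdom' : -2147483648 ≤ num ∧ num ≤ 2147483648 := by
    simpa [Dom_square_of_two, pvDomInt] using hdom
  by_cases h2 : num < 2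
  · rw [squareOfTwoLoop, if_pos (by omega), if_pos h2]
  · rw [if_neg h2,
      show (2:Int) = 2 * 1 by ring,
      loop_eq 40 num 1 num (by omega) (by omega) (by norm_num; omega),
      PySem.Int.floordiv_eq_ediv_of_pos (by omega : (0:Int) < 2 * 1)]
    norm_num

-- ===== VERDICT (by name: the statement is the Claim_ definition above) =====
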